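-- pv_equiv track=rewrite | github.com/Murkyshadow/Algorithms_8.0_Yandex | Темы 7-8 (Префиксные суммы и два указателя. Сортировка событий)/H. Премии от начальника.py | solution
-- ===== SOURCE A (Python) =====
-- def solution(n, recycling):
--     hard_worker_leave = [0] * n  # hard worker - работяга (кол-во людей с большим j+Aj), которые перестали быть работягами для i-ного
--     now_num_hard_worker = 0
--     ans = 0
--     for i, r in enumerate(recycling):
--         now_num_hard_worker -= hard_worker_leave[i]
--         if r != 0:
--             ans += now_num_hard_worker*r
--             now_num_hard_worker += 1
--             if i+r < n:
--                 hard_worker_leave[i+r] += 1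
--     return ans
-- ===== SOURCE B (Python) =====
-- def solution(n, recycling):
--     ans = 0
--     for i, r in enumerate(recycling):
--         if r != 0:
--             ans += r * sum(1 for j, rj in enumerate(recycling[:i]) if rj != 0 and j + rj > i)
--     return ans
-- ===== Notes on version B (the rewrite author's own statement) =====
-- stated objective: simpler
-- what changed: Replaces A's difference-array single pass (allocate [0]*n, maintain a running active-worker counter with scheduled decrements) by a direct nested count: for each nonzero recycling[i], add recycling[i] times the number of earlier nonzero entries j with j+recycling[j] > i; no auxiliary array or counter state is kept.
-- intended difference: On lists where a negative entry precedes a later nonzero entry, A keeps counting that negative-duration worker (its difference-array write lands on a Python-wrapped or already-passed index, so the +1 is never cancelled in time) and e.g. returns 2 on (3, [-1, 2]); B applies the intended overlap rule j+recycling[j] > i, under which a negative duration overlaps nothing, and returns 0 there. — e.g. on solution(3, [-1, 2]): A returns 2, B returns 0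
import Mathlib
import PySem

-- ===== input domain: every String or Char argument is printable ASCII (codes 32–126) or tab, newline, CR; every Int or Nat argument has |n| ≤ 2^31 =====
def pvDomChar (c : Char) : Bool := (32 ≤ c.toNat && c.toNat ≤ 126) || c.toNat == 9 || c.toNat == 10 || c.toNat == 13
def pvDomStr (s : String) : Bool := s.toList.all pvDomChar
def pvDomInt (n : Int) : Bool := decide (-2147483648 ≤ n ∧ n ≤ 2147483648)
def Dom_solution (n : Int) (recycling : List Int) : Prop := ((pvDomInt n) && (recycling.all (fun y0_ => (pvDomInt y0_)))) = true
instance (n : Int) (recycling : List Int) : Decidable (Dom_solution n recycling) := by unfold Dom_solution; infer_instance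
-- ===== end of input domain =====

-- B replaces A's difference-array bookkeeping by a direct per-worker overlap count (simpler: no auxiliary array, no O(n) allocation);
-- on lists where a negative entry precedes a nonzero one A's wrapped/stale difference-array write makes A's count an artefact, stated as D_ below.

-- ===== PORT A =====
-- loop body of A (helper so the proofs can name one step of the fold)
def stepA (n : Int) (s : List Int × Int × Int) (p : Int × Int) : List Int × Int × Int :=
  let now := s.2.1 - PySem.List.pyGetD s.1 p.1 0        -- hard_worker_leave[i]; in range under Pre_
  if p.2 ≠ 0 then
    let ans := s.2.2 + now * p.2
    let now := now + 1
    if p.1 + p.2 < n then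
      (PySem.List.pySetD s.1 (p.1 + p.2) (PySem.List.pyGetD s.1 (p.1 + p.2) 0 + 1), now, ans)  -- wrapped index in range under Pre_
    else (s.1, now, ans)
  else (s.1, now, s.2.2)

def solution (n : Int) (recycling : List Int) : Int :=
  ((PySem.List.enumerate recycling 0).foldl (stepA n)
    (PySem.List.pyRepeat [0] n, 0, 0)).2.2              -- [0] * n, now = 0, ans = 0

-- ===== PORT B =====
def solution_alt (n : Int) (recycling : List Int) : Int :=
  (PySem.List.enumerate recycling 0).foldl
    (fun (ans : Int) (p : Int × Int) =>
      if p.2 ≠ 0 then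
        ans + p.2 * ((PySem.List.enumerate (PySem.List.slice recycling none (some p.1)) 0).countP
                      (fun q => decide (q.2 ≠ 0 ∧ p.1 < q.1 + q.2)) : Int)
      else ans) 0

-- ===== PRECONDITION & SPEC =====
-- Pre_ excludes exactly the inputs where A raises IndexError: a list longer than n (read hard_worker_leave[i] at i = n),
-- and a nonzero entry r at position j with j + r < -n (the difference-array write's negative index is out of range).
def Pre_solution (n : Int) (recycling : List Int) : Prop :=
  (recycling = [] ∨ (recycling.length : Int) ≤ n) ∧
  ∀ p ∈ PySem.List.enumerate recycling 0, p.2 ≠ 0 → -n ≤ p.1 + p.2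
instance (n : Int) (recycling : List Int) : Decidable (Pre_solution n recycling) := by unfold Pre_solution; infer_instance
def pvWitness_solution : Int × List Int := (5, [1, 3, 0, 2, 1])

-- On lists where a negative entry precedes a later nonzero entry, A still counts that negative-duration worker (its difference-array
-- write lands on a wrapped or already-passed index, so the +1 is never honestly cancelled) while B applies the intended interval rule
-- j + recycling[j] > i, under which a negative duration never overlaps anything — B's value is the intended overlap sum.
def D_solution (n : Int) (recycling : List Int) : Prop :=
  ∃ p ∈ PySem.List.enumerate recycling 0, ∃ q ∈ PySem.List.enumerate recycling 0,
    p.1 < q.1 ∧ p.2 < 0 ∧ q.2 ≠ 0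
instance (n : Int) (recycling : List Int) : Decidable (D_solution n recycling) := by unfold D_solution; infer_instance

def Spec_solution (n : Int) (recycling : List Int) (out : Int) : Prop :=
  ¬ D_solution n recycling → out = solution_alt n recycling
instance (n : Int) (recycling : List Int) (out : Int) : Decidable (Spec_solution n recycling out) := by unfold Spec_solution; infer_instance

def pvDiffWitness_solution : Int × List Int := (3, [-1, 2])
def pvDiffWitnessOut_solution : Int × Int := (2, 0)

-- ===== CLAIM (what is proved, stated in full; the proofs are below) =====
def Claim_unchanged_solution : Prop := ∀ (n : Int) (recycling : List Int), Dom_solution n recycling → Pre_solution n recycling → Spec_solution n recycling (solution n recycling)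
def Claim_changed_solution : Prop := Dom_solution (pvDiffWitness_solution.1) (pvDiffWitness_solution.2) ∧ Pre_solution (pvDiffWitness_solution.1) (pvDiffWitness_solution.2) ∧ D_solution (pvDiffWitness_solution.1) (pvDiffWitness_solution.2) ∧ solution (pvDiffWitness_solution.1) (pvDiffWitness_solution.2) = pvDiffWitnessOut_solution.1 ∧ solution_alt (pvDiffWitness_solution.1) (pvDiffWitness_solution.2) = pvDiffWitnessOut_solution.2 ∧ pvDiffWitnessOut_solution.1 ≠ pvDiffWitnessOut_solution.2

-- ===== LEMMAS AND PROOFS =====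

-- B's per-step contribution, as a pure term (n plays no role in B's body)
def termB (full : List Int) (p : Int × Int) : Int :=
  if p.2 ≠ 0 then
    p.2 * ((PySem.List.enumerate (PySem.List.slice full none (some p.1)) 0).countP
            (fun q => decide (q.2 ≠ 0 ∧ p.1 < q.1 + q.2)) : Int)
  else 0

-- workers j < i with leave time ≥ k (A's now before step i, for k = i)
def cntA (full : List Int) (i : Nat) (k : Int) : Nat :=
  ((PySem.List.enumerate full 0).take i).countP (fun q => decide (q.2 ≠ 0 ∧ k ≤ q.1 + q.2))
-- workers j < i scheduled to leave exactly at k (A's hard_worker_leave[k] after i steps)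
def cntE (full : List Int) (i : Nat) (k : Int) : Nat :=
  ((PySem.List.enumerate full 0).take i).countP (fun q => decide (q.2 ≠ 0 ∧ q.1 + q.2 = k))

theorem take_enumerate {α : Type} : ∀ (xs : List α) (s : Int) (i : Nat),
    (PySem.List.enumerate xs s).take i = PySem.List.enumerate (xs.take i) s := by
  intro xs
  induction xs with
  | nil => simp [PySem.List.enumerate]
  | cons x t ih =>
    intro s i
    cases i with
    | zero => simp [PySem.List.enumerate]
    | succ j => simp [PySem.List.enumerate_cons, ih]

theorem countP_split (l : List (Int × Int)) (i : Int) :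
    l.countP (fun q => decide (q.2 ≠ 0 ∧ i ≤ q.1 + q.2))
      = l.countP (fun q => decide (q.2 ≠ 0 ∧ q.1 + q.2 = i))
        + l.countP (fun q => decide (q.2 ≠ 0 ∧ i + 1 ≤ q.1 + q.2)) := by
  induction l with
  | nil => simp
  | cons x t ih =>
    simp only [List.countP_cons, ih, decide_eq_true_eq]
    split_ifs <;> omega

theorem take_succ_getElem {α : Type} (l : List α) (i : Nat) (h : i < l.length) :
    l.take (i+1) = l.take i ++ [l[i]] := by
  rw [List.take_add_one]
  simp [List.getElem?_eq_getElem h]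

theorem cntA_succ (full : List Int) (i : Nat) (k : Int) (h : i < full.length) :
    cntA full (i+1) k
      = cntA full i k + if full[i] ≠ 0 ∧ k ≤ (i : Int) + full[i] then 1 else 0 := by
  unfold cntA
  rw [take_succ_getElem _ i (by simp [PySem.List.length_enumerate, h]),
      List.countP_append, PySem.List.getElem_enumerate]
  simp

theorem cntE_succ (full : List Int) (i : Nat) (k : Int) (h : i < full.length) :
    cntE full (i+1) k
      = cntE full i k + if full[i] ≠ 0 ∧ (i : Int) + full[i] = k then 1 else 0 := by
  unfold cntE
  rw [take_succ_getElem _ i (by simp [PySem.List.length_enumerate, h]),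
      List.countP_append, PySem.List.getElem_enumerate]
  simp

theorem altB_fold (full : List Int) :
    ∀ (l : List (Int × Int)) (a : Int),
      l.foldl
        (fun (ans : Int) (p : Int × Int) =>
          if p.2 ≠ 0 then
            ans + p.2 * ((PySem.List.enumerate (PySem.List.slice full none (some p.1)) 0).countP
                          (fun q => decide (q.2 ≠ 0 ∧ p.1 < q.1 + q.2)) : Int)
          else ans) a
      = a + (l.map (termB full)).sum := by
  intro l
  induction l with
  | nil => simp
  | cons x t ih =>
    intro a
    simp only [List.foldl_cons, List.map_cons, List.sum_cons, ih, termB]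
    split <;> ring

theorem solution_alt_eq_sum (n : Int) (full : List Int) :
    solution_alt n full = ((PySem.List.enumerate full 0).map (termB full)).sum := by
  unfold solution_alt
  rw [altB_fold]
  ring

theorem loopA_zero_tail (n : Int) :
    ∀ (l : List (Int × Int)) (s : List Int × Int × Int), (∀ p ∈ l, p.2 = 0) →
      (l.foldl (stepA n) s).2.2 = s.2.2 := by
  intro l
  induction l with
  | nil => intro s _; rfl
  | cons x t ih =>
    intro s h
    rw [List.foldl_cons, ih _ (fun p hp => h p (List.mem_cons_of_mem _ hp))]
    simp [stepA, h x List.mem_cons_self]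

theorem termB_snd_zero (full : List Int) (p : Int × Int) (h : p.2 = 0) : termB full p = 0 := by
  simp [termB, h]

theorem loopA_spec (n : Int) (full : List Int)
    (hlen : (full.length : Int) ≤ n)
    (hnD : ¬ D_solution n full) :
    ∀ (rest : List Int) (i : Nat) (leave : List Int) (now ans : Int),
      full.drop i = rest → i ≤ full.length →
      leave.length = n.toNat →
      (∀ k : Nat, i ≤ k → k < n.toNat →
        PySem.List.pyGetD leave (k : Int) 0 = (cntE full i (k : Int) : Int)) →
      now = (cntA full i (i : Int) : Int) →
      ((PySem.List.enumerate rest (i : Int)).foldl (stepA n) (leave, now, ans)).2.2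
        = ans + ((PySem.List.enumerate rest (i : Int)).map (termB full)).sum := by
  intro rest
  induction rest with
  | nil => intro i leave now ans _ _ _ _ _; simp [PySem.List.enumerate]
  | cons r rest' ih =>
    intro i leave now ans hdrop hi hlenL hleave hnow
    have hiL : i < full.length := by
      by_contra h
      have h2 : full.drop i = [] := List.drop_eq_nil_of_le (by omega)
      rw [hdrop] at h2
      simp at h2
    have hfi : full[i] = r := by
      have h0 : (full.drop i)[0]'(by rw [hdrop]; simp) = full[i + 0]'(by omega) :=
        List.getElem_drop ..
      simp only [hdrop] at h0
      simpa using h0.symm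
    have hdrop' : full.drop (i+1) = rest' := by
      have h1 : List.drop 1 (List.drop i full) = List.drop (i+1) full := by
        rw [List.drop_drop]
      rw [hdrop] at h1
      simpa using h1.symm
    have hin : i < n.toNat := by omega
    have hread : PySem.List.pyGetD leave (i : Int) 0 = (cntE full i (i : Int) : Int) :=
      hleave i le_rfl hin
    have hsplit := countP_split ((PySem.List.enumerate full 0).take i) (i : Int)
    have hnow1 : now - PySem.List.pyGetD leave (i : Int) 0 = (cntA full i ((i : Int) + 1) : Int) := by
      rw [hread, hnow]
      unfold cntA cntE at *
      omega
    rw [PySem.List.enumerate_cons, List.foldl_cons, List.map_cons, List.sum_cons]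
    by_cases hr : r = 0
    · -- step leaves ans and leave unchanged
      have hstep : stepA n (leave, now, ans) ((i : Int), r)
          = (leave, now - PySem.List.pyGetD leave (i : Int) 0, ans) := by
        simp [stepA, hr]
      rw [hstep]
      have hE : ∀ k : Nat, cntE full (i+1) (k : Int) = cntE full i (k : Int) := by
        intro k
        rw [cntE_succ full i (k : Int) hiL, hfi]
        simp [hr]
      have hA : cntA full (i+1) ((i : Int) + 1) = cntA full i ((i : Int) + 1) := by
        rw [cntA_succ full i ((i : Int) + 1) hiL, hfi]
        simp [hr]
      have hrec := ih (i+1) leave (now - PySem.List.pyGetD leave (i : Int) 0) ans hdrop' (by omega)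
        hlenL
        (fun k hk1 hk2 => by rw [hleave k (by omega) hk2, hE k])
        (by rw [hnow1]; push_cast; rw [hA])
      push_cast at hrec ⊢
      rw [hrec, termB_snd_zero full _ hr]
      ring
    · have htermB : termB full ((i : Int), r) = r * (cntA full i ((i : Int) + 1) : Int) := by
        have hcnt : (PySem.List.enumerate (full.take i) 0).countP
              (fun q => decide (q.2 ≠ 0 ∧ ((i : Int), r).1 < q.1 + q.2))
            = cntA full i ((i : Int) + 1) := by
          unfold cntA
          rw [← take_enumerate]
          apply List.countP_congr
          intro q _
          simp only [decide_eq_true_eq]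
          omega
        unfold termB
        rw [if_pos (show (((i : Int), r)).2 ≠ 0 from hr), PySem.List.slice_to_natCast, hcnt]
      by_cases hneg : r < 0
      · -- first negative entry: every later entry is 0 (¬ D_), so ans is frozen from here on
        have hzero : ∀ p ∈ PySem.List.enumerate rest' ((i : Int) + 1), p.2 = 0 := by
          intro q hq
          rw [PySem.List.mem_enumerate_iff] at hq
          obtain ⟨k, hk, rfl⟩ := hq
          by_contra hq2
          apply hnD
          unfold D_solution
          have hrl : rest'.length = full.length - (i+1) := by
            rw [← hdrop']
            simp
          have hg : rest'[k]'hk = full[i + 1 + k]'(by omega) := by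
            have h1 : rest'[k]? = full[i + 1 + k]? := by
              rw [← hdrop', List.getElem?_drop]
            rw [List.getElem?_eq_getElem hk, List.getElem?_eq_getElem (by omega)] at h1
            exact Option.some.inj h1
          refine ⟨((i : Int), r), ?_, ((i : Int) + 1 + (k : Int), rest'[k]), ?_, ?_, hneg, hq2⟩
          · rw [PySem.List.mem_enumerate_iff]
            exact ⟨i, hiL, by simp [hfi]⟩
          · rw [PySem.List.mem_enumerate_iff]
            refine ⟨i + 1 + k, by omega, ?_⟩
            rw [← hg]
            refine Prod.ext ?_ (by simp)
            push_cast
            ring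
          · show (i : Int) < (i : Int) + 1 + (k : Int)
            omega
        rw [loopA_zero_tail n _ _ hzero]
        have hsum0 : ((PySem.List.enumerate rest' ((i : Int) + 1)).map (termB full)).sum = 0 := by
          apply List.sum_eq_zero
          intro x hx
          rw [List.mem_map] at hx
          obtain ⟨p, hp, rfl⟩ := hx
          exact termB_snd_zero full p (hzero p hp)
        have hstep2 : (stepA n (leave, now, ans) ((i : Int), r)).2.2
            = ans + (now - PySem.List.pyGetD leave (i : Int) 0) * r := by
          simp only [stepA]
          rw [if_pos (show (((i : Int), r)).2 ≠ 0 from hr)]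
          split <;> rfl
        rw [hstep2, hsum0, hnow1, htermB]
        ring
      · -- r > 0: the write (if any) goes to index i + r, in range, and the invariant advances
        have hpos : 0 < r := by omega
        have hstep3 : stepA n (leave, now, ans) ((i : Int), r)
            = (if (i : Int) + r < n then
                 PySem.List.pySetD leave ((i : Int) + r)
                   (PySem.List.pyGetD leave ((i : Int) + r) 0 + 1)
               else leave,
               now - PySem.List.pyGetD leave (i : Int) 0 + 1,
               ans + (now - PySem.List.pyGetD leave (i : Int) 0) * r) := by
          simp only [stepA]
          rw [if_pos (show (((i : Int), r)).2 ≠ 0 from hr)]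
          split <;> rfl
        rw [hstep3]
        set leave2 := if (i : Int) + r < n then
            PySem.List.pySetD leave ((i : Int) + r)
              (PySem.List.pyGetD leave ((i : Int) + r) 0 + 1)
          else leave with hleave2def
        have hlen2 : leave2.length = n.toNat := by
          rw [hleave2def]
          split <;> simp [PySem.List.length_pySetD, hlenL]
        have hE2 : ∀ k : Nat, cntE full (i+1) (k : Int)
            = cntE full i (k : Int) + if (i : Int) + r = (k : Int) then 1 else 0 := by
          intro k
          rw [cntE_succ full i (k : Int) hiL, hfi]
          simp [hr]
        have hleaveInv : ∀ k : Nat, i + 1 ≤ k → k < n.toNat →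
            PySem.List.pyGetD leave2 (k : Int) 0 = (cntE full (i+1) (k : Int) : Int) := by
          intro k hk1 hk2
          rw [hleave2def]
          by_cases hw : (i : Int) + r < n
          · rw [if_pos hw]
            set m0 : Nat := ((i : Int) + r).toNat with hm0def
            have hm0 : ((i : Int) + r) = (m0 : Int) := by omega
            have hmlt : m0 < leave.length := by omega
            rw [hm0, PySem.List.pyGetD_pySetD_natCast leave m0 k
                  (PySem.List.pyGetD leave (m0 : Int) 0 + 1) 0 hmlt]
            by_cases hke : k = m0
            · rw [if_pos hke, hleave m0 (by omega) (by omega), hE2 k,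
                  if_pos (show (i : Int) + r = (k : Int) by omega)]
              have : ((m0 : Nat) : Int) = (k : Int) := by omega
              rw [show cntE full i ((m0 : Nat) : Int) = cntE full i (k : Int) by rw [this]]
              push_cast
              ring
            · rw [if_neg hke, hleave k (by omega) hk2, hE2 k,
                  if_neg (show ¬ (i : Int) + r = (k : Int) by omega)]
              simp
          · rw [if_neg hw, hleave k (by omega) hk2, hE2 k,
                if_neg (show ¬ (i : Int) + r = (k : Int) by omega)]
            simp
        have hA2 : cntA full (i+1) ((i : Int) + 1) = cntA full i ((i : Int) + 1) + 1 := by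
          rw [cntA_succ full i ((i : Int) + 1) hiL, hfi]
          rw [if_pos ⟨hr, by omega⟩]
        have hrec := ih (i+1) leave2 (now - PySem.List.pyGetD leave (i : Int) 0 + 1)
          (ans + (now - PySem.List.pyGetD leave (i : Int) 0) * r) hdrop' (by omega)
          hlen2 hleaveInv
          (by rw [hnow1]; push_cast; rw [hA2]; push_cast; ring)
        push_cast at hrec ⊢
        rw [hrec, htermB, hnow1]
        ring

-- ===== VERDICT (by name: the statement is the Claim_ definition above) =====
theorem solution_spec : Claim_unchanged_solution := by
  intro n recycling _ hPre
  unfold Spec_solution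
  intro hnD
  rcases hPre with ⟨hlen, _⟩
  rcases hlen with hnil | hlen
  · subst hnil
    rfl
  · unfold solution
    have h0 := loopA_spec n recycling hlen hnD recycling 0
      (PySem.List.pyRepeat [0] n) 0 0 (by simp) (by omega)
      (by rw [PySem.List.pyRepeat_singleton]; simp)
      (by
        intro k _ hk2
        rw [PySem.List.pyRepeat_singleton, PySem.List.pyGetD_natCast]
        simp [List.getD_eq_getElem?_getD, hk2, cntE])
      (by simp [cntA])
    push_cast at h0
    rw [h0, solution_alt_eq_sum]
    ring

theorem solution_changed : Claim_changed_solution := by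
  unfold Claim_changed_solution; decide
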